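-- pv_equiv track=rewrite | github.com/Wayne0758/leetcode | Wayne0758/leetcode/1605-minimum-number-of-days-to-make-m-bouquets/solution.py | getBouquetCount
-- ===== SOURCE A (Python) =====
-- from typing import List
--
-- def getBouquetCount(bloomDay: List[int], k: int, waitingDays: int) -> int:
--     BouquetCount = 0
--     requireFlower = k
--     for day in bloomDay:
--         if day>waitingDays:
--             requireFlower = k
--         else:
--             requireFlower-=1
--             if requireFlower==0:
--                 BouquetCount+=1
--                 requireFlower = k
--     return BouquetCount
-- ===== SOURCE B (Python) =====
-- def getBouquetCount(bloomDay, k, waitingDays):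
--     # Stage 1: DP array of consecutive-bloomed run lengths ending at each position.
--     runlens = []
--     h = 0
--     for day in bloomDay:
--         h = h + 1 if day <= waitingDays else 0
--         runlens.append(h)
--     # Stage 2: a bouquet completes exactly at positions whose run length is a positive multiple of k.
--     return sum(1 for h in runlens if h > 0 and h % k == 0)
-- ===== Notes on version B (the rewrite author's own statement) =====
-- stated objective: alternative
-- what changed: B is a two-stage computation: it first materialises the DP array of consecutive-bloomed run lengths ending at each position, then counts the positions whose run length is a positive multiple of k (bouquet completion points); A is a single pass with a countdown counter that resets.
-- outside the precondition, e.g. on getBouquetCount([3], 0, 5): A returns 0, B raises ZeroDivisionError; on getBouquetCount([3, 3], -2, 5): A returns 0, B returns 1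
import Mathlib
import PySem

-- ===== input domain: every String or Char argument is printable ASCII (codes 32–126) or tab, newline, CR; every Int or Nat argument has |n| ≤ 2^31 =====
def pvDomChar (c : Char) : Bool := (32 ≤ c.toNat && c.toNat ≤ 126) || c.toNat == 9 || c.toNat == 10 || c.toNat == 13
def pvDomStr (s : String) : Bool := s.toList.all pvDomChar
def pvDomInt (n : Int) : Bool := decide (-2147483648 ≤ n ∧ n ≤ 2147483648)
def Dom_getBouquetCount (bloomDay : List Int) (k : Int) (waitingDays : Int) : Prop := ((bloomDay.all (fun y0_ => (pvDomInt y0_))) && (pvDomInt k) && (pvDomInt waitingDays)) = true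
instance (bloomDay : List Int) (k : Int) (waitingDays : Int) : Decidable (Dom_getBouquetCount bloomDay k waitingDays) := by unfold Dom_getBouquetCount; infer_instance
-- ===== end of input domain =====

-- B computes the answer in two stages (materialise the run-length DP array, then count positions whose run length is a positive multiple of k) instead of A's countdown pass; equal for k ≥ 1.


-- ===== PORT A =====
-- A: countdown counter 'requireFlower', reset on an unbloomed flower, bouquet when it hits 0
def getBouquetCount (bloomDay : List Int) (k : Int) (waitingDays : Int) : Int :=
  (bloomDay.foldl (fun (st : Int × Int) day =>
      if day > waitingDays then (st.1, k)
      else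
        let r := st.2 - 1
        if r = 0 then (st.1 + 1, k) else (st.1, r))
    (0, k)).1

-- ===== PORT B =====
-- B stage 1: the list 'runlens' of consecutive-bloomed run lengths ending at each position
def pvRunlens (bloomDay : List Int) (waitingDays : Int) : List Int :=
  (bloomDay.foldl (fun (st : List Int × Int) day =>
      let h := if day ≤ waitingDays then st.2 + 1 else 0
      (st.1 ++ [h], h)) ([], 0)).1

-- B stage 2: count positions whose run length is a positive multiple of k
def getBouquetCount_alt (bloomDay : List Int) (k : Int) (waitingDays : Int) : Int :=
  ((pvRunlens bloomDay waitingDays).filter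
      (fun h => decide (h > 0) && (PySem.Int.mod h k == 0))).length

-- ===== PRECONDITION & SPEC =====
-- Pre_ restricts to the task's natural domain of positive bouquet sizes: for k = 0 B raises
-- ZeroDivisionError, and for k < 0 (a bouquet size outside any sensible domain) A's countdown
-- happens to return 0 while B's modular test can count positions.
def Pre_getBouquetCount (_bloomDay : List Int) (k : Int) (_waitingDays : Int) : Prop := 1 ≤ k
instance (bloomDay : List Int) (k : Int) (waitingDays : Int) : Decidable (Pre_getBouquetCount bloomDay k waitingDays) := by unfold Pre_getBouquetCount; infer_instance
def pvWitness_getBouquetCount : List Int × Int × Int := ([1, 10, 2, 3, 4], 2, 4)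

def Spec_getBouquetCount (bloomDay : List Int) (k : Int) (waitingDays : Int) (out : Int) : Prop := out = getBouquetCount_alt bloomDay k waitingDays
instance (bloomDay : List Int) (k : Int) (waitingDays : Int) (out : Int) : Decidable (Spec_getBouquetCount bloomDay k waitingDays out) := by unfold Spec_getBouquetCount; infer_instance

-- ===== CLAIM (what is proved, stated in full; the proofs are below) =====
def Claim_equal_getBouquetCount : Prop := ∀ (bloomDay : List Int) (k : Int) (waitingDays : Int), Dom_getBouquetCount bloomDay k waitingDays → Pre_getBouquetCount bloomDay k waitingDays → Spec_getBouquetCount bloomDay k waitingDays (getBouquetCount bloomDay k waitingDays)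

-- ===== LEMMAS AND PROOFS =====

-- mod facts for stepping a run length by one
theorem succ_mod_of_top (k run : Int) (hk : 0 < k) (h : run % k = k - 1) :
    (run + 1) % k = 0 := by
  have e := Int.mul_ediv_add_emod run k
  have h1 : run + 1 = k * (run / k + 1) := by rw [mul_add, mul_one]; linarith
  rw [h1, Int.mul_emod_right]

theorem succ_mod_of_mid (k run : Int) (hk : 0 < k) (h : run % k ≠ k - 1) :
    (run + 1) % k = run % k + 1 := by
  have e := Int.mul_ediv_add_emod run k
  have hb1 := Int.emod_nonneg run (ne_of_gt hk)
  have hb2 := Int.emod_lt_of_pos run hk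
  have h1 : run + 1 = (run % k + 1) + k * (run / k) := by linarith
  rw [h1, Int.add_mul_emod_self_left, Int.emod_eq_of_lt (by omega) (by omega)]

-- the list-building fold only appends: pulling the accumulator out front
theorem runlens_acc (w : Int) (xs : List Int) : ∀ (acc : List Int) (h : Int),
    (List.foldl (fun (st : List Int × Int) day =>
        let h := if day ≤ w then st.2 + 1 else 0
        (st.1 ++ [h], h)) (acc, h) xs).1
    = acc ++ (List.foldl (fun (st : List Int × Int) day =>
        let h := if day ≤ w then st.2 + 1 else 0
        (st.1 ++ [h], h)) ([], h) xs).1 := by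
  induction xs with
  | nil => intro acc h; simp
  | cons d xs ih =>
      intro acc h
      simp only [List.foldl]
      rw [ih (acc ++ _), ih ([] ++ _)]
      simp

-- loop invariant: when the bloomed run ending here has length h (h ≥ 0), A's countdown
-- state is k - h % k, and A's count so far plus the completion points of the rest match.
theorem loop_eq (k w : Int) (hk : 0 < k) (xs : List Int) : ∀ (c h : Int), 0 ≤ h →
    (List.foldl (fun (st : Int × Int) day =>
        if day > w then (st.1, k)
        else
          let r := st.2 - 1
          if r = 0 then (st.1 + 1, k) else (st.1, r))
      (c, k - h % k) xs).1
    = c + ((List.foldl (fun (st : List Int × Int) day =>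
        let h := if day ≤ w then st.2 + 1 else 0
        (st.1 ++ [h], h)) ([], h) xs).1.filter
          (fun h => decide (h > 0) && (PySem.Int.mod h k == 0))).length := by
  induction xs with
  | nil => intro c h _; simp
  | cons d xs ih =>
      intro c h hh
      simp only [List.foldl]
      by_cases hd : d ≤ w
      · have hd' : ¬ d > w := by omega
        simp only [if_neg hd', if_pos hd]
        rw [runlens_acc, List.filter_append]
        by_cases hm : h % k = k - 1
        · have e2 := succ_mod_of_top k h hk hm
          have hr : k - h % k - 1 = 0 := by omega
          have hmod : PySem.Int.mod (h + 1) k = 0 := by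
            rw [PySem.Int.mod_eq_emod_of_pos hk, e2]
          have hp : (decide ((h + 1) > 0) && (PySem.Int.mod (h + 1) k == 0)) = true := by
            rw [hmod]; simp; omega
          have key := ih (c + 1) (h + 1) (by omega)
          rw [e2, sub_zero] at key
          simp only [hr, List.filter_cons, List.filter_nil, hp, if_true,
            List.nil_append, List.length_append, List.length_cons, List.length_nil, key]
          push_cast; ring
        · have e2 := succ_mod_of_mid k h hk hm
          have hb1 := Int.emod_nonneg h (ne_of_gt hk)
          have hr : k - h % k - 1 ≠ 0 := by omega
          have hmod : PySem.Int.mod (h + 1) k = h % k + 1 := by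
            rw [PySem.Int.mod_eq_emod_of_pos hk, e2]
          have hp : (decide ((h + 1) > 0) && (PySem.Int.mod (h + 1) k == 0)) = false := by
            rw [hmod]; simp; omega
          have key := ih c (h + 1) (by omega)
          rw [e2] at key
          have e3 : k - h % k - 1 = k - (h % k + 1) := by ring
          simp only [List.filter_cons, List.filter_nil, hp,
            Bool.false_eq_true, if_false, List.nil_append, e3]
          rw [if_neg (show k - (h % k + 1) ≠ 0 by omega)]
          exact key
      · have hd' : d > w := by omega
        simp only [if_pos hd', if_neg hd]
        rw [runlens_acc, List.filter_append]
        have hp : (decide ((0 : Int) > 0) && (PySem.Int.mod 0 k == 0)) = false := by simp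
        have key := ih c 0 (by omega)
        simp only [Int.zero_emod, sub_zero] at key
        simp only [List.filter_cons, List.filter_nil, hp, Bool.false_eq_true, if_false,
          List.nil_append, key]

-- ===== VERDICT (by name: the statement is the Claim_ definition above) =====
theorem getBouquetCount_spec : Claim_equal_getBouquetCount := by
  intro bloomDay k waitingDays _ hk
  unfold Spec_getBouquetCount getBouquetCount getBouquetCount_alt pvRunlens
  have hk' : (1:Int) ≤ k := hk
  have h := loop_eq k waitingDays (by omega) bloomDay 0 0 (by omega)
  simp only [Int.zero_emod, sub_zero] at h
  rw [h]
  simp
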